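-- pv_equiv track=rewrite | github.com/Yerinnnn/Algorithm | 백준/Gold/5430. AC/AC.py | process_commands
-- ===== SOURCE A (Python) =====
-- from collections import deque
--
-- def process_commands(p, n, arr):
--     reverse = False  # 뒤집힘 여부를 나타내는 플래그
--     dq = deque(arr)  # 배열을 deque로 변환
--
--     for command in p:
--         if command == 'R':  # 뒤집기 명령
--             reverse = not reverse
--         elif command == 'D':  # 첫 번째 원소 삭제
--             if not dq:  # 덱이 비어있으면 에러 발생
--                 return "error"
--             if reverse:
--                 dq.pop()  # 뒤집힌 상태라면 마지막 원소 제거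
--             else:
--                 dq.popleft()  # 정상 상태라면 첫 번째 원소 제거
--
--     if reverse:  # 뒤집힌 상태면 결과도 뒤집어서 출력
--         dq.reverse()
--     return "[" + ",".join(map(str, dq)) + "]"
-- ===== SOURCE B (Python) =====
-- def process_commands(p, n, arr):
--     # Two index counters + a reverse flag; no container is built or mutated.
--     front = 0
--     back = 0
--     rev = False
--     L = len(arr)
--     for c in p:
--         if c == 'R':
--             rev = not rev
--         elif c == 'D':
--             if rev:
--                 back += 1
--             else:
--                 front += 1
--             if front + back > L:
--                 return "error"
--     res = arr[front:L - back]
--     if rev: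
--         res = res[::-1]
--     return "[" + ",".join(map(str, res)) + "]"
-- ===== Notes on version B (the rewrite author's own statement) =====
-- stated objective: simpler
-- what changed: Replaces the deque that is popped element by element with two integer counters (front, back) plus a reverse flag; the answer is one final slice of the untouched input list, reversed if the flag is set.
import Mathlib
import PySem

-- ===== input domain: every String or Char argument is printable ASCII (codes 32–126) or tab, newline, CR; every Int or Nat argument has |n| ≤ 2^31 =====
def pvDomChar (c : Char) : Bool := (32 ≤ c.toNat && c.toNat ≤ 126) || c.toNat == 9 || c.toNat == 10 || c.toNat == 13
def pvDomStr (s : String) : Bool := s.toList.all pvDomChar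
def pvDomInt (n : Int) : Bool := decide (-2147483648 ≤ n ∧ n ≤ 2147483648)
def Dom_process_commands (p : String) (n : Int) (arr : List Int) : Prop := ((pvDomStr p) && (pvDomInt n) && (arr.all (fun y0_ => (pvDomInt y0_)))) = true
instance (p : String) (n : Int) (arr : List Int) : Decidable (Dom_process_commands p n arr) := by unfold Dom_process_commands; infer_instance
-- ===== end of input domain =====

-- B replaces A's deque (popped element by element) with two index counters and a reverse flag plus one final slice (objective: simpler).

-- ===== PORT A =====
-- loop over p with early return "error": none = returned "error" inside the loop
def pcGoA : List Char → Bool × List Int → Option (Bool × List Int)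
  | [], st => some st
  | c :: cs, (rev, dq) =>
    if c = 'R' then pcGoA cs (!rev, dq)
    else if c = 'D' then
      if dq.isEmpty then none
      else if rev then pcGoA cs (rev, dq.dropLast)
      else pcGoA cs (rev, dq.tail)
    else pcGoA cs (rev, dq)

def process_commands (p : String) (n : Int) (arr : List Int) : String :=
  match pcGoA p.toList (false, arr) with
  | none => "error"
  | some (rev, dq) =>
    let dq := if rev then dq.reverse else dq
    "[" ++ PySem.Str.join "," (dq.map PySem.Int.toStr) ++ "]"

-- ===== PORT B =====
-- counters front/back (Python ints, never negative: Nat) over the untouched arr; none = returned "error"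
def pcGoB (L : Nat) : List Char → Bool × Nat × Nat → Option (Bool × Nat × Nat)
  | [], st => some st
  | c :: cs, (rev, f, b) =>
    if c = 'R' then pcGoB L cs (!rev, f, b)
    else if c = 'D' then
      let f' := if rev then f else f + 1
      let b' := if rev then b + 1 else b
      if f' + b' > L then none else pcGoB L cs (rev, f', b')
    else pcGoB L cs (rev, f, b)

def process_commands_alt (p : String) (n : Int) (arr : List Int) : String :=
  let L := arr.length
  match pcGoB L p.toList (false, 0, 0) with
  | none => "error"
  | some (rev, f, b) =>
    let res := PySem.List.slice arr (some (f : Int)) (some ((L : Int) - (b : Int)))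
    let res' := if rev then res.reverse else res
    "[" ++ PySem.Str.join "," (res'.map PySem.Int.toStr) ++ "]"

-- ===== PRECONDITION & SPEC =====
def Spec_process_commands (p : String) (n : Int) (arr : List Int) (out : String) : Prop := out = process_commands_alt p n arr
instance (p : String) (n : Int) (arr : List Int) (out : String) : Decidable (Spec_process_commands p n arr out) := by unfold Spec_process_commands; infer_instance

-- ===== CLAIM (what is proved, stated in full; the proofs are below) =====
def Claim_equal_process_commands : Prop := ∀ (p : String) (n : Int) (arr : List Int), Dom_process_commands p n arr → Spec_process_commands p n arr (process_commands p n arr)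

-- ===== LEMMAS AND PROOFS =====

theorem take_tail' {α : Type} (l : List α) (m : Nat) : (l.take (m + 1)).tail = l.tail.take m := by
  cases l <;> simp

theorem dropLast_take' {α : Type} (l : List α) (m : Nat) (h : m + 1 ≤ l.length) :
    (l.take (m + 1)).dropLast = l.take m := by
  rw [List.dropLast_eq_take, List.length_take, List.take_take]
  congr 1
  omega

theorem pcGo_rel (arr : List Int) (cs : List Char) :
    ∀ (rev : Bool) (f b : Nat), f + b ≤ arr.length →
      pcGoA cs (rev, (arr.drop f).take (arr.length - f - b)) =
        (pcGoB arr.length cs (rev, f, b)).map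
          (fun st => (st.1, (arr.drop st.2.1).take (arr.length - st.2.1 - st.2.2))) := by
  induction cs with
  | nil => intro rev f b _; rfl
  | cons c cs ih =>
    intro rev f b hfb
    simp only [pcGoA, pcGoB]
    by_cases hR : c = 'R'
    · rw [if_pos hR, if_pos hR]
      exact ih (!rev) f b hfb
    · rw [if_neg hR, if_neg hR]
      by_cases hD : c = 'D'
      · rw [if_pos hD, if_pos hD]
        by_cases hemp : f + b = arr.length
        · have h0 : arr.length - f - b = 0 := by omega
          rw [if_pos (show ((arr.drop f).take (arr.length - f - b)).isEmpty by simp [h0]),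
              if_pos (show ((if rev then f else f + 1) + if rev then b + 1 else b) > arr.length by
                cases rev <;> simp <;> omega)]
          rfl
        · have hlt : f + b < arr.length := lt_of_le_of_ne hfb hemp
          obtain ⟨k, hk⟩ : ∃ k, arr.length - f - b = k + 1 := ⟨arr.length - f - b - 1, by omega⟩
          rw [if_neg (show ¬ ((arr.drop f).take (arr.length - f - b)).isEmpty by
                simp [List.isEmpty_iff, ← List.length_eq_zero_iff]; omega),
              if_neg (show ¬ (((if rev then f else f + 1) + if rev then b + 1 else b) > arr.length) by
                cases rev <;> simp <;> omega)]
          cases rev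
          · -- D, not reversed: popleft is tail; B does front+1
            simp only [Bool.false_eq_true, if_false]
            have ht : ((arr.drop f).take (arr.length - f - b)).tail
                = (arr.drop (f + 1)).take (arr.length - (f + 1) - b) := by
              rw [hk, take_tail', List.tail_drop]
              congr 1
              omega
            rw [ht]
            exact ih false (f + 1) b (by omega)
          · -- D, reversed: pop is dropLast; B does back+1
            simp only [if_true]
            have hd : ((arr.drop f).take (arr.length - f - b)).dropLast
                = (arr.drop f).take (arr.length - f - (b + 1)) := by
              rw [hk, dropLast_take' _ k (by simp [List.length_drop]; omega)]
              congr 1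
              omega
            rw [hd]
            exact ih true f (b + 1) (by omega)
      · rw [if_neg hD, if_neg hD]
        exact ih rev f b hfb

theorem pcGoB_bound (L : Nat) (cs : List Char) :
    ∀ (rev : Bool) (f b : Nat) (st : Bool × Nat × Nat), f + b ≤ L →
      pcGoB L cs (rev, f, b) = some st → st.2.1 + st.2.2 ≤ L := by
  induction cs with
  | nil =>
    intro rev f b st h heq
    simp only [pcGoB] at heq
    cases heq; exact h
  | cons c cs ih =>
    intro rev f b st h heq
    simp only [pcGoB] at heq
    by_cases h1 : c = 'R'
    · rw [if_pos h1] at heq; exact ih (!rev) f b st h heq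
    · rw [if_neg h1] at heq
      by_cases h2 : c = 'D'
      · rw [if_pos h2] at heq
        cases rev
        · simp only [Bool.false_eq_true, if_false] at heq
          split_ifs at heq with h3
          exact ih false (f + 1) b st (by omega) heq
        · simp only [if_true] at heq
          split_ifs at heq with h3
          exact ih true f (b + 1) st (by omega) heq
      · rw [if_neg h2] at heq
        exact ih rev f b st h heq

theorem slice_eq_take (arr : List Int) (f b : Nat) (hb : b ≤ arr.length) :
    PySem.List.slice arr (some (f : Int)) (some ((arr.length : Int) - (b : Int)))
      = (arr.drop f).take (arr.length - f - b) := by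
  have h : (arr.length : Int) - (b : Int) = ((arr.length - b : Nat) : Int) := by omega
  rw [h, PySem.List.slice_natCast]
  congr 1
  omega

-- ===== VERDICT (by name: the statement is the Claim_ definition above) =====
theorem process_commands_spec : Claim_equal_process_commands := by
  intro p n arr _
  unfold Spec_process_commands process_commands process_commands_alt
  dsimp only
  have h := pcGo_rel arr p.toList false 0 0 (by omega)
  simp only [List.drop_zero, Nat.sub_zero, List.take_length] at h
  rw [h]
  cases hB : pcGoB arr.length p.toList (false, 0, 0) with
  | none => rfl
  | some st =>
    obtain ⟨rev, f, b⟩ := st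
    have hfb : f + b ≤ arr.length :=
      pcGoB_bound arr.length p.toList false 0 0 (rev, f, b) (by omega) hB
    simp only [Option.map_some]
    rw [slice_eq_take arr f b (by omega)]
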